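-- pv_equiv track=rewrite | github.com/mohoc/squares | naive/naive.py | squares_set
-- ===== SOURCE A (Python) =====
-- def is_square(word, beg_pos, end_pos) :
--   candidate_len = end_pos - beg_pos + 1
--   if candidate_len % 2 == 1 :
--     return False
--   else :
--     mid_len = candidate_len // 2
--     return word[beg_pos : beg_pos + mid_len] == word[beg_pos + mid_len : end_pos + 1]
--
-- def squares_set(word) :
--   squares_set = set()
--   n = len(word)
--   for end_pos in range(n) :
--     for beg_pos in range(end_pos + 1) :
--       if is_square(word, beg_pos, end_pos) :
--         squares_set.add(word[beg_pos : end_pos + 1])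
--   return squares_set
-- ===== SOURCE B (Python) =====
-- def _match_run(flags):
--     # cnt[b] = number of consecutive True flags starting at b (computed right-to-left)
--     cnt = [0] * len(flags)
--     for b in range(len(flags) - 1, -1, -1):
--         if flags[b]:
--             cnt[b] = (cnt[b + 1] if b + 1 < len(flags) else 0) + 1
--     return cnt
--
-- def squares_set(word):
--     n = len(word)
--     # runs[m][b] = length of the longest stretch from b on which word matches itself shifted by m
--     runs = [_match_run([word[b] == word[b + m] for b in range(n - m)]) for m in range(n // 2 + 1)]
--     result = set()
--     for end_pos in range(n):
--         for beg_pos in range(end_pos + 1):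
--             cand_len = end_pos - beg_pos + 1
--             if cand_len % 2 == 0:
--                 mid_len = cand_len // 2
--                 if runs[mid_len][beg_pos] >= mid_len:
--                     result.add(word[beg_pos:end_pos + 1])
--     return result
-- ===== Notes on version B (the rewrite author's own statement) =====
-- stated objective: alternative
-- what changed: B precomputes a dynamic-programming table of self-match run lengths (run[m][b] = how far word matches itself shifted by m from position b) and tests each square candidate by one table lookup instead of A's per-candidate slice comparison; measured wall-clock on tested sizes is comparable, since A's slice comparisons run in C.
import Mathlib
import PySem

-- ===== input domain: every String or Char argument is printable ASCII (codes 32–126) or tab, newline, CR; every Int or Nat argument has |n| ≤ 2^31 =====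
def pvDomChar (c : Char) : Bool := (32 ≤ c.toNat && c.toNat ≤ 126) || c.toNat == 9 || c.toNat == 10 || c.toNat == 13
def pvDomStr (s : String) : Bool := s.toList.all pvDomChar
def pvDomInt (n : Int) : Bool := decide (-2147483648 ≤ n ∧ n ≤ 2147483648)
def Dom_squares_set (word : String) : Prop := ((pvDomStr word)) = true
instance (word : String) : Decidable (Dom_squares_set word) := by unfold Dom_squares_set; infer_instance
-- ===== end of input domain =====

-- B replaces A's per-candidate slice comparison by a lookup in a precomputed
-- self-match run-length table (dynamic programming); same distinct squares, same order.

-- ===== PORT A =====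
def is_square (word : String) (beg_pos end_pos : Int) : Bool :=
  let candidate_len := end_pos - beg_pos + 1
  if PySem.Int.mod candidate_len 2 == 1 then false
  else
    let mid_len := PySem.Int.floordiv candidate_len 2
    PySem.Str.slice word (some beg_pos) (some (beg_pos + mid_len)) ==
      PySem.Str.slice word (some (beg_pos + mid_len)) (some (end_pos + 1))

def squares_set (word : String) : List String :=
  let n : Int := PySem.Str.len word
  (PySem.List.pyRange 0 n 1).foldl (fun sq end_pos =>
    (PySem.List.pyRange 0 (end_pos + 1) 1).foldl (fun sq beg_pos =>
      if is_square word beg_pos end_pos then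
        PySem.Set.add sq (PySem.Str.slice word (some beg_pos) (some (end_pos + 1)))
      else sq) sq) PySem.Set.empty

-- ===== PORT B =====
-- _match_run: the right-to-left loop 'cnt[b] = cnt[b+1] + 1 if flags[b] else 0' as structural recursion
def matchRun : List Bool → List Int
  | [] => []
  | f :: rest =>
    let r := matchRun rest
    (if f then r.headD 0 + 1 else 0) :: r

def squares_set_alt (word : String) : List String :=
  let cl := word.toList
  let n : Int := cl.length
  let runs : List (List Int) :=
    (PySem.List.pyRange 0 (PySem.Int.floordiv n 2 + 1) 1).map (fun m =>
      matchRun ((PySem.List.pyRange 0 (n - m) 1).map (fun b =>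
        PySem.List.pyGetD cl b ' ' == PySem.List.pyGetD cl (b + m) ' ')))
  (PySem.List.pyRange 0 n 1).foldl (fun res end_pos =>
    (PySem.List.pyRange 0 (end_pos + 1) 1).foldl (fun res beg_pos =>
      let cand_len := end_pos - beg_pos + 1
      if PySem.Int.mod cand_len 2 == 0 then
        let mid_len := PySem.Int.floordiv cand_len 2
        if mid_len ≤ PySem.List.pyGetD (PySem.List.pyGetD runs mid_len []) beg_pos 0 then
          PySem.Set.add res (PySem.Str.slice word (some beg_pos) (some (end_pos + 1)))
        else res
      else res) res) PySem.Set.empty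

-- ===== PRECONDITION & SPEC =====
def Spec_squares_set (word : String) (out : List String) : Prop := out = squares_set_alt word
instance (word : String) (out : List String) : Decidable (Spec_squares_set word out) := by unfold Spec_squares_set; infer_instance

-- ===== CLAIM (what is proved, stated in full; the proofs are below) =====
def Claim_equal_squares_set : Prop := ∀ (word : String), Dom_squares_set word → Spec_squares_set word (squares_set word)

-- ===== LEMMAS AND PROOFS =====

theorem headD_eq_getD (l : List Int) : l.headD 0 = l.getD 0 0 := by cases l <;> rfl

theorem pvBeqDecide {α : Type} [BEq α] [LawfulBEq α] [DecidableEq α] (x y : α) :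
    (x == y) = decide (x = y) := by
  by_cases h : x = y <;> simp [h]

theorem matchRun_nonneg (F : List Bool) (b : Nat) : 0 ≤ (matchRun F).getD b 0 := by
  induction F generalizing b with
  | nil => simp [matchRun]
  | cons f rest ih =>
    cases b with
    | zero =>
      simp only [matchRun, List.getD_cons_zero]
      split
      · rw [headD_eq_getD]
        have := ih 0
        omega
      · omega
    | succ b' => simpa [matchRun] using ih b'

-- run-length characterisation: cnt[b] ≥ k ↔ the k flags starting at b are all true
theorem matchRun_ge_iff (F : List Bool) (b k : Nat) :
    ((k : Int) ≤ (matchRun F).getD b 0) ↔ (∀ j < k, F.getD (b + j) false = true) := by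
  induction F generalizing b k with
  | nil =>
    simp only [matchRun, List.getD_nil]
    constructor
    · intro h j hj
      omega
    · intro h
      by_contra hk
      have hk0 : 0 < k := by omega
      have := h 0 hk0
      simp at this
  | cons f rest ih =>
    cases b with
    | succ b' =>
      have hshift : ∀ j, (f :: rest).getD (b' + 1 + j) false = rest.getD (b' + j) false := by
        intro j
        have : b' + 1 + j = (b' + j) + 1 := by omega
        rw [this]
        simp
      simp only [matchRun, List.getD_cons_succ]
      constructor
      · intro h j hj
        rw [hshift j]
        exact (ih b' k).mp h j hj
      · intro h
        exact (ih b' k).mpr (fun j hj => by rw [← hshift j]; exact h j hj)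
    | zero =>
      cases k with
      | zero =>
        constructor
        · intro _ j hj; omega
        · intro _
          simpa using matchRun_nonneg (f :: rest) 0
      | succ k' =>
        simp only [matchRun, List.getD_cons_zero]
        cases f with
        | false =>
          constructor
          · intro h
            exfalso
            simp at h
            omega
          · intro h
            have h0 := h 0 (by omega)
            simp at h0
        | true =>
          rw [if_pos rfl, headD_eq_getD]
          constructor
          · intro h j hj
            cases j with
            | zero => simp
            | succ j' =>
              simp only [Nat.zero_add, List.getD_cons_succ]
              simpa using (ih 0 k').mp (by push_cast at h ⊢; omega) j' (by omega)
          · intro h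
            have h' : (k' : Int) ≤ (matchRun rest).getD 0 0 := by
              apply (ih 0 k').mpr
              intro j hj
              have := h (j + 1) (by omega)
              simpa using this
            push_cast
            omega

theorem str_eq_iff_toList (s t : String) : s = t ↔ s.toList = t.toList := by
  constructor
  · intro h; rw [h]
  · intro h; exact String.toList_inj.mp h

theorem strslice_beq (word : String) (a b c d : Option Int) :
    (PySem.Str.slice word a b == PySem.Str.slice word c d)
      = (PySem.List.slice word.toList a b == PySem.List.slice word.toList c d) := by
  rw [pvBeqDecide, pvBeqDecide, decide_eq_decide]
  rw [str_eq_iff_toList]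
  simp [PySem.Str.toList_slice]

theorem take_drop_eq_iff (cl : List Char) (b m : Nat) (_h : b + 2 * m ≤ cl.length) :
    ((cl.drop b).take m = (cl.drop (b + m)).take m) ↔ ∀ j < m, cl[b + j]? = cl[b + m + j]? := by
  constructor
  · intro he j hj
    have := congrArg (fun l => l[j]?) he
    simpa [List.getElem?_take_of_lt hj, List.getElem?_drop] using this
  · intro hj
    apply List.ext_getElem?
    intro i
    by_cases hi : i < m
    · rw [List.getElem?_take_of_lt hi, List.getElem?_take_of_lt hi,
        List.getElem?_drop, List.getElem?_drop]
      exact hj i hi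
    · rw [List.getElem?_eq_none (by simp; omega), List.getElem?_eq_none (by simp; omega)]

-- THE core equivalence: slice comparison of the two halves = run-length table lookup
theorem core (cl : List Char) (bn m : Nat) (_hm : 1 ≤ m) (h2 : bn + 2 * m ≤ cl.length) :
    (PySem.List.slice cl (some (bn : Int)) (some ((bn : Int) + (m : Int))) ==
      PySem.List.slice cl (some ((bn : Int) + (m : Int))) (some ((bn : Int) + 2 * (m : Int))))
    = decide ((m : Int) ≤ PySem.List.pyGetD
        (matchRun ((PySem.List.pyRange 0 ((cl.length : Int) - (m : Int)) 1).map (fun b =>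
          PySem.List.pyGetD cl b ' ' == PySem.List.pyGetD cl (b + (m : Int)) ' '))) (bn : Int) 0) := by
  have hF : ∀ j, j < m →
      (((PySem.List.pyRange 0 ((cl.length : Int) - (m : Int)) 1).map (fun b =>
        PySem.List.pyGetD cl b ' ' == PySem.List.pyGetD cl (b + (m : Int)) ' ')).getD (bn + j) false)
      = (cl.getD (bn + j) ' ' == cl.getD (bn + j + m) ' ') := by
    intro j hj
    have hlt : bn + j < cl.length - m := by omega
    rw [show ((cl.length : Int) - (m : Int)) = ((cl.length - m : Nat) : Int) from by omega]
    rw [List.getD_eq_getElem?_getD]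
    rw [PySem.List.getElem?_map_pyRange_zero _ _ _ hlt]
    simp only [Option.getD_some]
    rw [show ((bn + j : Nat) : Int) + (m : Int) = ((bn + j + m : Nat) : Int) from by push_cast; ring]
    rw [PySem.List.pyGetD_natCast, PySem.List.pyGetD_natCast]
  rw [PySem.List.slice_natCast_add]
  rw [show (bn : Int) + 2 * (m : Int) = ((bn + m : Nat) : Int) + (m : Int) from by push_cast; ring,
    show (bn : Int) + (m : Int) = ((bn + m : Nat) : Int) from by push_cast; ring]
  rw [PySem.List.slice_natCast_add]
  rw [PySem.List.pyGetD_natCast]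
  rw [pvBeqDecide, decide_eq_decide]
  rw [matchRun_ge_iff]
  rw [take_drop_eq_iff cl bn m h2]
  constructor
  · intro h j hj
    rw [hF j hj, pvBeqDecide, decide_eq_true_eq]
    rw [List.getD_eq_getElem?_getD, List.getD_eq_getElem?_getD]
    rw [show bn + j + m = bn + m + j from by omega]
    rw [h j hj]
  · intro h j hj
    have hch := h j hj
    rw [hF j hj, pvBeqDecide, decide_eq_true_eq] at hch
    rw [show bn + j + m = bn + m + j from by omega] at hch
    rw [List.getD_eq_getElem cl ' ' (by omega), List.getD_eq_getElem cl ' ' (by omega)] at hch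
    rw [List.getElem?_eq_getElem (by omega), List.getElem?_eq_getElem (by omega),
      Option.some_inj]
    exact hch

theorem squares_set_eq_alt (word : String) : squares_set word = squares_set_alt word := by
  unfold squares_set squares_set_alt
  simp only [PySem.Str.len_eq]
  apply PySem.List.foldl_congr_mem
  intro acc e he
  apply PySem.List.foldl_congr_mem
  intro acc' bp hb
  rw [PySem.List.mem_pyRange_one] at he hb
  obtain ⟨he0, heN⟩ := he
  obtain ⟨hb0, hbe⟩ := hb
  obtain ⟨en, rfl⟩ := Int.eq_ofNat_of_zero_le he0
  obtain ⟨bn, rfl⟩ := Int.eq_ofNat_of_zero_le hb0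
  have hbn_le : bn ≤ en := by omega
  have hen_lt : en < word.toList.length := by exact_mod_cast heN
  by_cases hpar : (en - bn + 1) % 2 = 0
  · -- even candidate length
    have hmod0 : PySem.Int.mod ((en : Int) - (bn : Int) + 1) 2 = 0 := by
      rw [PySem.Int.mod_eq_emod_of_pos (by norm_num)]
      omega
    have hdivm : PySem.Int.floordiv ((en : Int) - (bn : Int) + 1) 2
        = (((en - bn + 1) / 2 : Nat) : Int) := by
      rw [PySem.Int.floordiv_eq_ediv_of_pos (by norm_num)]
      omega
    have hm1 : 1 ≤ (en - bn + 1) / 2 := by omega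
    have h2m : bn + 2 * ((en - bn + 1) / 2) ≤ word.toList.length := by omega
    have he1 : ((en : Int) + 1) = (bn : Int) + 2 * (((en - bn + 1) / 2 : Nat) : Int) := by
      push_cast
      omega
    have hsq : is_square word (bn : Int) (en : Int)
        = decide ((((en - bn + 1) / 2 : Nat) : Int) ≤ PySem.List.pyGetD
            (matchRun ((PySem.List.pyRange 0 ((word.toList.length : Int) - (((en - bn + 1) / 2 : Nat) : Int)) 1).map (fun b =>
              PySem.List.pyGetD word.toList b ' ' ==
                PySem.List.pyGetD word.toList (b + (((en - bn + 1) / 2 : Nat) : Int)) ' '))) (bn : Int) 0) := by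
      simp only [is_square]
      rw [hmod0, hdivm]
      rw [show ((0 : Int) == 1) = false from rfl]
      rw [if_neg Bool.false_ne_true]
      rw [he1, strslice_beq word]
      exact core word.toList bn ((en - bn + 1) / 2) hm1 h2m
    rw [hsq, hmod0, hdivm]
    rw [show ((0 : Int) == 0) = true from rfl]
    rw [if_pos rfl]
    rw [PySem.List.pyGetD_map_pyRange_of_nonneg _ _ _ _ (by positivity)
      (by rw [PySem.Int.floordiv_eq_ediv_of_pos (by norm_num)]; omega)]
    by_cases hc : (((en - bn + 1) / 2 : Nat) : Int) ≤ PySem.List.pyGetD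
        (matchRun ((PySem.List.pyRange 0 ((word.toList.length : Int) - (((en - bn + 1) / 2 : Nat) : Int)) 1).map (fun b =>
          PySem.List.pyGetD word.toList b ' ' ==
            PySem.List.pyGetD word.toList (b + (((en - bn + 1) / 2 : Nat) : Int)) ' '))) (bn : Int) 0
    · rw [if_pos (decide_eq_true hc), if_pos hc]
    · rw [if_neg (by simpa using hc), if_neg hc]
  · -- odd candidate length
    have hmod1 : PySem.Int.mod ((en : Int) - (bn : Int) + 1) 2 = 1 := by
      rw [PySem.Int.mod_eq_emod_of_pos (by norm_num)]
      omega
    have hsq : is_square word (bn : Int) (en : Int) = false := by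
      simp only [is_square]
      rw [hmod1]
      rw [if_pos (show ((1 : Int) == 1) = true from rfl)]
    rw [hsq, if_neg Bool.false_ne_true, hmod1]
    rw [show ((1 : Int) == 0) = false from rfl]
    rw [if_neg Bool.false_ne_true]

-- ===== VERDICT (by name: the statement is the Claim_ definition above) =====
theorem squares_set_spec : Claim_equal_squares_set := by
  intro word _
  unfold Spec_squares_set
  exact squares_set_eq_alt word
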